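-- pv_equiv track=rewrite | github.com/scafa-assistant/hivecore-v2 | engine/neuroplastizitaet.py | _erinnerung_zu_region
-- ===== SOURCE A (Python) =====
-- def _erinnerung_zu_region(treffer: dict) -> str:
--     """Mappe Erinnerungs-Typ auf Ziel-Region fuer Lichtbogen."""
--     tags = treffer.get('tags', [])
--     if any(t in tags for t in ['angst', 'wut', 'trauer', 'panik']):
--         return 'amygdala'
--     if any(t in tags for t in ['koerper', 'schmerz', 'unwohlsein']):
--         return 'insula'
--     if any(t in tags for t in ['denken', 'entscheidung', 'reflexion']):
--         return 'praefrontal'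
--     if any(t in tags for t in ['muster', 'gewohnheit', 'routine']):
--         return 'cerebellum'
--     return 'neokortex'
-- ===== SOURCE B (Python) =====
-- _TABELLE = {
--     'angst': (0, 'amygdala'),
--     'wut': (0, 'amygdala'),
--     'trauer': (0, 'amygdala'),
--     'panik': (0, 'amygdala'),
--     'koerper': (1, 'insula'),
--     'schmerz': (1, 'insula'),
--     'unwohlsein': (1, 'insula'),
--     'denken': (2, 'praefrontal'),
--     'entscheidung': (2, 'praefrontal'),
--     'reflexion': (2, 'praefrontal'),
--     'muster': (3, 'cerebellum'),
--     'gewohnheit': (3, 'cerebellum'),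
--     'routine': (3, 'cerebellum'),
-- }
--
-- def _erinnerung_zu_region(treffer: dict) -> str:
--     """Mappe Erinnerungs-Typ auf Ziel-Region fuer Lichtbogen."""
--     tags = treffer.get('tags', [])
--     best = (4, 'neokortex')
--     for tag, eintrag in _TABELLE.items():
--         if tag in tags and eintrag[0] < best[0]:
--             best = eintrag
--     return best[1]
-- ===== Notes on version B (the rewrite author's own statement) =====
-- stated objective: idiomatic
-- what changed: Replaces the four short-circuit any()-priority checks with a single tag->(rank,region) table scanned once, keeping the entry of lowest rank.
import Mathlib
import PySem

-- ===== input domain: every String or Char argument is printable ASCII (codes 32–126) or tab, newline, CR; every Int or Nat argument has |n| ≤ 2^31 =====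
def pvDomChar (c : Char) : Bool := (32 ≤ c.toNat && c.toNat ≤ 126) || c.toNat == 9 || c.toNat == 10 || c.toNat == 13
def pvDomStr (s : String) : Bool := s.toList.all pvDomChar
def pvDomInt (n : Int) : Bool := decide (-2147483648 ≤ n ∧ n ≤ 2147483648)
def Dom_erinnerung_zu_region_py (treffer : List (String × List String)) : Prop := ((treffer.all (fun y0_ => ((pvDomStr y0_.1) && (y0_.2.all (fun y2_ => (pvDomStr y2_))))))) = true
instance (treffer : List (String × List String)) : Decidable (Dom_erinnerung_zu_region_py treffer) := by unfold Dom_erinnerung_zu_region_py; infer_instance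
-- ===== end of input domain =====

-- ===== PORT A =====
-- B replaces A's four short-circuit any() priority checks with one table-driven min-rank scan (idiomatic; same cost).
def erinnerung_zu_region_py (treffer : List (String × List String)) : String :=
  let tags := PySem.Dict.getD ⟨treffer⟩ "tags" []
  if (["angst", "wut", "trauer", "panik"]).any (fun t => tags.contains t) then "amygdala"
  else if (["koerper", "schmerz", "unwohlsein"]).any (fun t => tags.contains t) then "insula"
  else if (["denken", "entscheidung", "reflexion"]).any (fun t => tags.contains t) then "praefrontal"
  else if (["muster", "gewohnheit", "routine"]).any (fun t => tags.contains t) then "cerebellum"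
  else "neokortex"

-- ===== PORT B =====
def pvTabelle : List (String × (Int × String)) :=
  [("angst", (0, "amygdala")), ("wut", (0, "amygdala")), ("trauer", (0, "amygdala")), ("panik", (0, "amygdala")),
   ("koerper", (1, "insula")), ("schmerz", (1, "insula")), ("unwohlsein", (1, "insula")),
   ("denken", (2, "praefrontal")), ("entscheidung", (2, "praefrontal")), ("reflexion", (2, "praefrontal")),
   ("muster", (3, "cerebellum")), ("gewohnheit", (3, "cerebellum")), ("routine", (3, "cerebellum"))]

def erinnerung_zu_region_py_alt (treffer : List (String × List String)) : String :=
  let tags := PySem.Dict.getD ⟨treffer⟩ "tags" []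
  (pvTabelle.foldl
    (fun best eintrag =>
      if tags.contains eintrag.1 = true ∧ eintrag.2.1 < best.1 then eintrag.2 else best)
    ((4 : Int), "neokortex")).2

-- ===== PRECONDITION & SPEC =====
def Spec_erinnerung_zu_region_py (treffer : List (String × List String)) (out : String) : Prop := out = erinnerung_zu_region_py_alt treffer
instance (treffer : List (String × List String)) (out : String) : Decidable (Spec_erinnerung_zu_region_py treffer out) := by unfold Spec_erinnerung_zu_region_py; infer_instance

-- ===== CLAIM (what is proved, stated in full; the proofs are below) =====
def Claim_equal_erinnerung_zu_region_py : Prop := ∀ (treffer : List (String × List String)), Dom_erinnerung_zu_region_py treffer → Spec_erinnerung_zu_region_py treffer (erinnerung_zu_region_py treffer)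

-- ===== LEMMAS AND PROOFS =====
theorem fold_stop (tags : List String) (l : List (String × (Int × String))) (b : Int × String)
    (h : ∀ e ∈ l, ¬ e.2.1 < b.1) :
    l.foldl (fun best eintrag =>
      if tags.contains eintrag.1 = true ∧ eintrag.2.1 < best.1 then eintrag.2 else best) b = b := by
  induction l with
  | nil => rfl
  | cons e tl ih =>
    simp only [List.foldl_cons]
    rw [if_neg (by intro hc; exact h e (List.mem_cons_self) hc.2)]
    exact ih (fun e' he' => h e' (List.mem_cons_of_mem _ he'))

theorem fold_find (tags : List String) (l : List (String × (Int × String))) (b : Int × String)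
    (hmono : l.Pairwise (fun e1 e2 => e1.2.1 ≤ e2.2.1)) (hb : ∀ e ∈ l, e.2.1 < b.1) :
    l.foldl (fun best eintrag =>
      if tags.contains eintrag.1 = true ∧ eintrag.2.1 < best.1 then eintrag.2 else best) b
    = ((l.find? (fun e => tags.contains e.1)).map Prod.snd).getD b := by
  induction l generalizing b with
  | nil => rfl
  | cons e tl ih =>
    rcases List.pairwise_cons.mp hmono with ⟨hle, htl⟩
    simp only [List.foldl_cons, List.find?]
    by_cases hc : tags.contains e.1 = true
    · rw [if_pos ⟨hc, hb e (List.mem_cons_self)⟩, hc,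
        fold_stop tags tl e.2 (fun e' he' => not_lt.mpr (hle e' he'))]
      rfl
    · rw [if_neg (fun h => hc h.1)]
      rw [Bool.not_eq_true] at hc
      rw [hc]
      exact ih b htl (fun e' he' => hb e' (List.mem_cons_of_mem _ he'))

set_option maxHeartbeats 8000000 in
theorem core_eq (tags : List String) :
    (if (["angst", "wut", "trauer", "panik"]).any (fun t => tags.contains t) then "amygdala"
     else if (["koerper", "schmerz", "unwohlsein"]).any (fun t => tags.contains t) then "insula"
     else if (["denken", "entscheidung", "reflexion"]).any (fun t => tags.contains t) then "praefrontal"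
     else if (["muster", "gewohnheit", "routine"]).any (fun t => tags.contains t) then "cerebellum"
     else "neokortex")
    = (pvTabelle.foldl
        (fun best eintrag =>
          if tags.contains eintrag.1 = true ∧ eintrag.2.1 < best.1 then eintrag.2 else best)
        ((4 : Int), "neokortex")).2 := by
  rw [fold_find tags pvTabelle ((4 : Int), "neokortex") (by decide) (by decide)]
  simp only [pvTabelle, List.find?, List.any_cons, List.any_nil, Bool.or_false]
  cases h1 : tags.contains "angst" <;> cases h2 : tags.contains "wut" <;>
    cases h3 : tags.contains "trauer" <;> cases h4 : tags.contains "panik" <;>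
    cases h5 : tags.contains "koerper" <;> cases h6 : tags.contains "schmerz" <;>
    cases h7 : tags.contains "unwohlsein" <;> cases h8 : tags.contains "denken" <;>
    cases h9 : tags.contains "entscheidung" <;> cases h10 : tags.contains "reflexion" <;>
    cases h11 : tags.contains "muster" <;> cases h12 : tags.contains "gewohnheit" <;>
    cases h13 : tags.contains "routine" <;> rfl

-- ===== VERDICT (by name: the statement is the Claim_ definition above) =====
theorem erinnerung_zu_region_py_spec : Claim_equal_erinnerung_zu_region_py := by
  intro treffer _
  unfold Spec_erinnerung_zu_region_py erinnerung_zu_region_py erinnerung_zu_region_py_alt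
  exact core_eq _
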